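-- pv_equiv track=rewrite | github.com/s-dq/CBCM_tableqa | test_ml_knn.py | get_answer_cells
-- ===== SOURCE A (Python) =====
-- def get_answer_cells(cell_ids, layout):
--     # get the answer cell ids based on target row ids and target col ids, e.g., row_id = 3, col_id = 2, the answer cell locates at (3,2) in the table cell matrix.
--     if len(cell_ids) == 0:
--         return set([])
--     answer_set = set()
--
--     layout_all = [item for sublist in layout for item in sublist]
--     for i in cell_ids:
--         answer_set.add(layout_all[i])
--     return answer_set
-- ===== SOURCE B (Python) =====
-- # B: no flattening -- locate each queried flat index by walking row lengths (O(1) extra space).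
-- def _locate(layout, j):
--     # j is a nonnegative flat index; walk rows subtracting their lengths
--     for row in layout:
--         if j < len(row):
--             return row[j]
--         j -= len(row)
--     raise IndexError("list index out of range")
--
-- def get_answer_cells(cell_ids, layout):
--     if len(cell_ids) == 0:
--         return set([])
--     total = sum(len(row) for row in layout)
--     answer_set = set()
--     for i in cell_ids:
--         j = i + total if i < 0 else i
--         if j < 0:
--             raise IndexError("list index out of range")
--         answer_set.add(_locate(layout, j))
--     return answer_set
-- ===== Notes on version B (the rewrite author's own statement) =====
-- stated objective: alternative
-- what changed: B never builds the flattened list: it normalizes each (possibly negative) index against the total length and locates the value by walking rows and subtracting row lengths, using O(1) extra space instead of O(total).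
import Mathlib
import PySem

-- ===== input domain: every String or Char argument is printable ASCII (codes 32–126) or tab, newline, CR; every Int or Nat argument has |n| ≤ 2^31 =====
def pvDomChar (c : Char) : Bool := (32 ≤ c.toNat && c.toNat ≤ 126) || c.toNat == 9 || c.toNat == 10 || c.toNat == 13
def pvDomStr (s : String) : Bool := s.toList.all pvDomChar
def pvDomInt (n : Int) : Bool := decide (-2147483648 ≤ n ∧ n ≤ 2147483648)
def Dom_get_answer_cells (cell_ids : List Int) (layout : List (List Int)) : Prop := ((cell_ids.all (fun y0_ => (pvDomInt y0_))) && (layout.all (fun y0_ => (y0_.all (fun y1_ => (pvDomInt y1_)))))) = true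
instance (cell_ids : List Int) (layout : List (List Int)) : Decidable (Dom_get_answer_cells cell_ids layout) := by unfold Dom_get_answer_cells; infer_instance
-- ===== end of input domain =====

-- B never builds the flattened list: it normalizes each index and walks rows subtracting lengths.

-- ===== PORT A =====
def get_answer_cells (cell_ids : List Int) (layout : List (List Int)) : List Int :=
  if cell_ids.length = 0 then []
  else
    -- layout_all = [item for sublist in layout for item in sublist]
    let layout_all : List Int := layout.flatMap (fun sublist => sublist)
    cell_ids.foldl (fun answer_set i =>
      match PySem.List.pyGet? layout_all i with   -- layout_all[i]; none = IndexError, excluded by Pre_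
      | some v => PySem.Set.add answer_set v
      | none => answer_set) PySem.Set.empty

-- ===== PORT B =====
-- port of Source B's _locate: walk rows subtracting lengths; none = the IndexError at loop end
def pvLocate (layout : List (List Int)) (j : Int) : Option Int :=
  match layout with
  | [] => none
  | row :: rest =>
      if j < (row.length : Int) then PySem.List.pyGet? row j
      else pvLocate rest (j - row.length)

def get_answer_cells_alt (cell_ids : List Int) (layout : List (List Int)) : List Int :=
  if cell_ids.length = 0 then []
  else
    let total : Int := (layout.map (fun row => (row.length : Int))).sum
    cell_ids.foldl (fun answer_set i =>
      let j := if i < 0 then i + total else i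
      if j < 0 then answer_set                    -- Source B raises here; excluded by Pre_
      else match pvLocate layout j with
        | some v => PySem.Set.add answer_set v
        | none => answer_set) PySem.Set.empty     -- none = Source B's IndexError; excluded by Pre_

-- ===== PRECONDITION & SPEC =====
-- Pre_ excludes exactly the inputs where A raises IndexError: some index outside [-total, total).
def Pre_get_answer_cells (cell_ids : List Int) (layout : List (List Int)) : Prop :=
  ∀ i ∈ cell_ids, -((layout.map (fun row => (row.length : Int))).sum) ≤ i ∧
    i < (layout.map (fun row => (row.length : Int))).sum
instance (cell_ids : List Int) (layout : List (List Int)) : Decidable (Pre_get_answer_cells cell_ids layout) := by unfold Pre_get_answer_cells; infer_instance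

def pvWitness_get_answer_cells : List Int × List (List Int) := ([0, -1, 2], [[1, 2], [], [3]])

def Spec_get_answer_cells (cell_ids : List Int) (layout : List (List Int)) (out : List Int) : Prop := out = get_answer_cells_alt cell_ids layout
instance (cell_ids : List Int) (layout : List (List Int)) (out : List Int) : Decidable (Spec_get_answer_cells cell_ids layout out) := by unfold Spec_get_answer_cells; infer_instance

-- ===== CLAIM (what is proved, stated in full; the proofs are below) =====
def Claim_equal_get_answer_cells : Prop := ∀ (cell_ids : List Int) (layout : List (List Int)), Dom_get_answer_cells cell_ids layout → Pre_get_answer_cells cell_ids layout → Spec_get_answer_cells cell_ids layout (get_answer_cells cell_ids layout)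

-- ===== LEMMAS AND PROOFS =====
lemma pv_total_eq (layout : List (List Int)) :
    (((layout.map List.length).sum : Nat) : Int) = (layout.map (fun row => (row.length : Int))).sum := by
  induction layout with
  | nil => simp
  | cons row rest ih => simp [ih]

lemma pv_locate_eq (layout : List (List Int)) (j : Int) (h0 : 0 ≤ j) :
    pvLocate layout j = PySem.List.pyGet? (layout.flatMap (fun sublist => sublist)) j := by
  induction layout generalizing j with
  | nil => simp [pvLocate, PySem.List.pyGet?_of_nonneg _ h0]
  | cons row rest ih =>
    rw [pvLocate]
    by_cases hj : j < (row.length : Int)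
    · rw [if_pos hj, PySem.List.pyGet?_of_nonneg _ h0, PySem.List.pyGet?_of_nonneg _ h0]
      simp only [List.flatMap_cons]
      rw [List.getElem?_append_left (by omega)]
    · rw [if_neg hj, ih (j - row.length) (by omega),
        PySem.List.pyGet?_of_nonneg _ (by omega), PySem.List.pyGet?_of_nonneg _ h0]
      simp only [List.flatMap_cons]
      rw [List.getElem?_append_right (by omega)]
      congr 1
      omega

lemma pv_step_eq (layout : List (List Int)) (i : Int)
    (hlo : -((layout.map (fun row => (row.length : Int))).sum) ≤ i)
    (hhi : i < (layout.map (fun row => (row.length : Int))).sum) (s : List Int) :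
    (match PySem.List.pyGet? (layout.flatMap (fun sublist => sublist)) i with
      | some v => PySem.Set.add s v
      | none => s)
    = (let j := if i < 0 then i + (layout.map (fun row => (row.length : Int))).sum else i
       if j < 0 then s
       else match pvLocate layout j with
         | some v => PySem.Set.add s v
         | none => s) := by
  have hlen : ((layout.flatMap (fun sublist => sublist)).length : Int)
      = (layout.map (fun row => (row.length : Int))).sum := by
    rw [← pv_total_eq]; simp
  by_cases hi : i < 0
  · simp only [hi, if_pos]
    rw [if_neg (by omega)]
    rw [pv_locate_eq layout _ (by omega)]
    rw [PySem.List.pyGet?_neg _ hi (by omega),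
      PySem.List.pyGet?_of_nonneg _ (by omega)]
    have hidx : (layout.flatMap (fun sublist => sublist)).length - (-i).toNat
        = (i + (layout.map (fun row => (row.length : Int))).sum).toNat := by omega
    rw [hidx]
  · simp only [hi, if_false]
    rw [pv_locate_eq layout _ (by omega)]

lemma pv_foldl_eq (layout : List (List Int)) (cell_ids : List Int)
    (hpre : Pre_get_answer_cells cell_ids layout) :
    ∀ s : List Int,
      cell_ids.foldl (fun answer_set i =>
        match PySem.List.pyGet? (layout.flatMap (fun sublist => sublist)) i with
        | some v => PySem.Set.add answer_set v
        | none => answer_set) s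
      = cell_ids.foldl (fun answer_set i =>
          let j := if i < 0 then i + (layout.map (fun row => (row.length : Int))).sum else i
          if j < 0 then answer_set
          else match pvLocate layout j with
            | some v => PySem.Set.add answer_set v
            | none => answer_set) s := by
  induction cell_ids with
  | nil => intro s; rfl
  | cons i rest ih =>
    intro s
    have hi := hpre i (List.mem_cons_self)
    have hrest : Pre_get_answer_cells rest layout := fun x hx => hpre x (List.mem_cons_of_mem _ hx)
    simp only [List.foldl_cons]
    rw [pv_step_eq layout i hi.1 hi.2 s]
    exact ih hrest _

-- ===== VERDICT (by name: the statement is the Claim_ definition above) =====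
theorem get_answer_cells_spec : Claim_equal_get_answer_cells := by
  intro cell_ids layout _ hpre
  show get_answer_cells cell_ids layout = get_answer_cells_alt cell_ids layout
  unfold get_answer_cells get_answer_cells_alt
  by_cases h : cell_ids.length = 0
  · simp [h]
  · simp only [h, if_false]
    exact pv_foldl_eq layout cell_ids hpre PySem.Set.empty
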